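-- pv_equiv track=rewrite | github.com/GregoryMorse/dyngraph | sat.py | getsatmap
-- ===== SOURCE A (Python) =====
-- def getsatmap(clauses):
--   map = dict()
--   for clause in clauses:
--     for x in clause:
--       if not x in map: map[x] = set()
--       if not -x in map: map[-x] = set()
--       map[x].add(clause)
--   return map
-- ===== SOURCE B (Python) =====
-- def getsatmap(clauses):
--     # keys first (first-occurrence order of x, -x over all literals), then filter per key
--     keys = dict.fromkeys(x for clause in clauses for lit in clause for x in (lit, -lit))
--     return {k: {clause for clause in clauses if k in clause} for k in keys}
-- ===== Notes on version B (the rewrite author's own statement) =====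
-- stated objective: alternative
-- what changed: Replaces A's single interleaved pass that mutates a dict of sets per literal with a key-first decomposition: first collect all keys (each literal and its complement, deduped in first-occurrence order), then build each key's clause set by filtering the clause list per key.
import Mathlib
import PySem

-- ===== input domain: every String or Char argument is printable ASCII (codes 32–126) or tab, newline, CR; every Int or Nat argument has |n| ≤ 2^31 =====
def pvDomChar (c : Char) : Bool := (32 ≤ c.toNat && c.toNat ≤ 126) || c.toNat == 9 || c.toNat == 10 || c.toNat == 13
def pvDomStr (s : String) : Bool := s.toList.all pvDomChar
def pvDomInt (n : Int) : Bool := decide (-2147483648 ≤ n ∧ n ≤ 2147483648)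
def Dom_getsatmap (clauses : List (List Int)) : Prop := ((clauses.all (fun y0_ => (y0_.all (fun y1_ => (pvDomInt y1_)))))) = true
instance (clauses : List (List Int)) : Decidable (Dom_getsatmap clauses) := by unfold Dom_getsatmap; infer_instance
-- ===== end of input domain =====

-- B builds the key list up front (each literal and its complement, deduped in first-occurrence
-- order) and then filters the clause list once per key, instead of A's single interleaved pass
-- mutating a dict of sets; an alternative decomposition, not claimed faster.


-- ===== PORT A =====
-- loop body for one literal x of clause: 'if not x in map: map[x] = set()',
-- 'if not -x in map: map[-x] = set()', 'map[x].add(clause)'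
def pvLit (clause : List Int) (m : PySem.Dict Int (PySem.Set (List Int))) (x : Int) :
    PySem.Dict Int (PySem.Set (List Int)) :=
  let m1 := if m.contains x then m else m.insert x PySem.Set.empty
  let m2 := if m1.contains (-x) then m1 else m1.insert (-x) PySem.Set.empty
  m2.modify x PySem.Set.empty (fun s => PySem.Set.add s clause)

-- 'for x in clause: …'
def pvClause (m : PySem.Dict Int (PySem.Set (List Int))) (clause : List Int) :
    PySem.Dict Int (PySem.Set (List Int)) :=
  clause.foldl (pvLit clause) m

def getsatmap (clauses : List (List Int)) : List (Int × List (List Int)) :=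
  (clauses.foldl pvClause PySem.Dict.empty).items

-- ===== PORT B =====
-- keys = dict.fromkeys(x for clause in clauses for lit in clause for x in (lit, -lit));
-- {k: {clause for clause in clauses if k in clause} for k in keys}
def getsatmap_alt (clauses : List (List Int)) : List (Int × List (List Int)) :=
  let keys := PySem.List.dedup (clauses.flatMap (fun clause => clause.flatMap (fun x => [x, -x])))
  keys.map (fun k => (k, PySem.List.dedup (clauses.filter (fun clause => clause.contains k))))

-- ===== PRECONDITION & SPEC =====
def Spec_getsatmap (clauses : List (List Int)) (out : List (Int × List (List Int))) : Prop := out = getsatmap_alt clauses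
instance (clauses : List (List Int)) (out : List (Int × List (List Int))) : Decidable (Spec_getsatmap clauses out) := by unfold Spec_getsatmap; infer_instance

-- ===== CLAIM (what is proved, stated in full; the proofs are below) =====
def Claim_equal_getsatmap : Prop := ∀ (clauses : List (List Int)), Dom_getsatmap clauses → Spec_getsatmap clauses (getsatmap clauses)

-- ===== LEMMAS AND PROOFS =====

lemma keys_setdef (m : PySem.Dict Int (PySem.Set (List Int))) (k : Int) :
    (if m.contains k then m else m.insert k PySem.Set.empty).keys = PySem.Set.add m.keys k := by
  by_cases h : m.contains k = true
  · rw [if_pos h, PySem.Set.add_of_mem ((PySem.Dict.contains_iff_mem_keys m k).mp h)]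
  · have hf : m.contains k = false := by simpa using h
    rw [if_neg h, PySem.Dict.keys_insert_of_not_contains _ _ hf,
        PySem.Set.add_of_not_mem (fun hm => h ((PySem.Dict.contains_iff_mem_keys m k).mpr hm))]

lemma keys_pvLit (clause : List Int) (m : PySem.Dict Int (PySem.Set (List Int))) (x : Int) :
    (pvLit clause m x).keys = PySem.Set.add (PySem.Set.add m.keys x) (-x) := by
  unfold pvLit
  rw [PySem.Dict.keys_modify]
  set m1 := if m.contains x then m else m.insert x PySem.Set.empty with hm1
  set m2 := if m1.contains (-x) then m1 else m1.insert (-x) PySem.Set.empty with hm2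
  have hx : m2.contains x = true := by
    have h1 : x ∈ m1.keys := by
      rw [← PySem.Dict.contains_iff_mem_keys] at *
      by_cases h : m.contains x = true
      · rw [hm1, if_pos h]; exact h
      · rw [hm1, if_neg h]; exact PySem.Dict.contains_insert_self _ _ _
    have h1' : x ∈ m2.keys := by
      by_cases h : m1.contains (-x) = true
      · rw [hm2, if_pos h]; exact h1
      · rw [hm2, if_neg h, PySem.Dict.keys_insert_of_not_contains _ _ (by simpa using h)]
        exact List.mem_append_left _ h1
    exact (PySem.Dict.contains_iff_mem_keys m2 x).mpr h1'
  rw [PySem.Dict.keys_insert_of_contains _ _ hx]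
  have k1 : m1.keys = PySem.Set.add m.keys x := keys_setdef m x
  have k2 : m2.keys = PySem.Set.add m1.keys (-x) := by
    rw [hm2]
    by_cases h : m1.contains (-x) = true
    · rw [if_pos h, PySem.Set.add_of_mem ((PySem.Dict.contains_iff_mem_keys m1 (-x)).mp h)]
    · rw [if_neg h, PySem.Dict.keys_insert_of_not_contains _ _ (by simpa using h),
          PySem.Set.add_of_not_mem (fun hm => h ((PySem.Dict.contains_iff_mem_keys m1 (-x)).mpr hm))]
  rw [k2, k1]

lemma getD_setdef (m : PySem.Dict Int (PySem.Set (List Int))) (k' k : Int) :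
    (if m.contains k' then m else m.insert k' ([] : PySem.Set (List Int))).getD k [] = m.getD k [] := by
  by_cases h : m.contains k' = true
  · rw [if_pos h]
  · rw [if_neg h, PySem.Dict.getD_insert]
    split_ifs with hk
    · subst hk; exact (PySem.Dict.getD_of_not_contains m _ (by simpa using h)).symm
    · rfl

lemma getD_pvLit (clause : List Int) (m : PySem.Dict Int (PySem.Set (List Int))) (x k : Int) :
    (pvLit clause m x).getD k [] =
      if k = x then PySem.Set.add (m.getD k []) clause else m.getD k [] := by
  unfold pvLit
  simp only [show (PySem.Set.empty : PySem.Set (List Int)) = [] from rfl]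
  rw [PySem.Dict.getD_modify]
  simp only [getD_setdef]
  split_ifs with hk
  · subst hk; rfl
  · rfl

lemma getD_foldl_pvLit (c clause : List Int) (m : PySem.Dict Int (PySem.Set (List Int))) (k : Int) :
    (c.foldl (pvLit clause) m).getD k [] =
      if c.contains k then PySem.Set.add (m.getD k []) clause else m.getD k [] := by
  induction c generalizing m with
  | nil => simp
  | cons x c ih =>
    rw [List.foldl_cons, ih, getD_pvLit]
    by_cases hk : k = x
    · subst hk
      simp
    · have hcc : (x :: c).contains k = c.contains k := by
        simp only [List.contains_cons, beq_iff_eq, Bool.or_eq_right_iff_imp]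
        exact fun h => absurd h hk
      rw [hcc, if_neg hk]

lemma keys_foldl_pvLit (c clause : List Int) (m : PySem.Dict Int (PySem.Set (List Int))) :
    (c.foldl (pvLit clause) m).keys = PySem.Set.update m.keys (c.flatMap (fun x => [x, -x])) := by
  induction c generalizing m with
  | nil => rw [List.foldl_nil, List.flatMap_nil, PySem.Set.update_nil]
  | cons x c ih =>
    rw [List.foldl_cons, ih, keys_pvLit, List.flatMap_cons,
        show ([x, -x] : List Int) = [x] ++ [-x] from rfl, List.append_assoc,
        PySem.Set.update_append, PySem.Set.update_append,
        PySem.Set.update_cons, PySem.Set.update_nil, PySem.Set.update_cons, PySem.Set.update_nil]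

lemma keys_pvClause (clause : List Int) (m : PySem.Dict Int (PySem.Set (List Int))) :
    (pvClause m clause).keys = PySem.Set.update m.keys (clause.flatMap (fun x => [x, -x])) :=
  keys_foldl_pvLit clause clause m

lemma getD_pvClauseX (clause : List Int) (m : PySem.Dict Int (PySem.Set (List Int))) (k : Int) :
    (pvClause m clause).getD k [] =
      if clause.contains k then PySem.Set.add (m.getD k []) clause else m.getD k [] :=
  getD_foldl_pvLit clause clause m k

lemma keys_fold (clauses : List (List Int)) (m : PySem.Dict Int (PySem.Set (List Int))) :
    (clauses.foldl pvClause m).keys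
      = PySem.Set.update m.keys (clauses.flatMap (fun clause => clause.flatMap (fun x => [x, -x]))) := by
  induction clauses generalizing m with
  | nil => simp [PySem.Set.update_nil]
  | cons c cs ih =>
    rw [List.foldl_cons, ih, List.flatMap_cons, PySem.Set.update_append, keys_pvClause]

lemma getD_fold (clauses : List (List Int)) (m : PySem.Dict Int (PySem.Set (List Int))) (k : Int) :
    (clauses.foldl pvClause m).getD k []
      = PySem.Set.update (m.getD k []) (clauses.filter (fun clause => clause.contains k)) := by
  induction clauses generalizing m with
  | nil => simp [PySem.Set.update_nil]
  | cons c cs ih =>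
    rw [List.foldl_cons, ih, getD_pvClauseX]
    by_cases hc : c.contains k = true
    · rw [if_pos hc,
          show List.filter (fun clause => clause.contains k) (c :: cs)
              = c :: List.filter (fun clause => clause.contains k) cs from
            List.filter_cons_of_pos (by simpa using hc),
          PySem.Set.update_cons]
    · rw [if_neg hc,
          show List.filter (fun clause => clause.contains k) (c :: cs)
              = List.filter (fun clause => clause.contains k) cs from
            List.filter_cons_of_neg (by simpa using hc)]


-- ===== VERDICT (by name: the statement is the Claim_ definition above) =====
theorem getsatmap_spec : Claim_equal_getsatmap := by
  intro clauses _
  unfold Spec_getsatmap getsatmap getsatmap_alt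
  have hkeys : (clauses.foldl pvClause PySem.Dict.empty).keys
      = PySem.Set.ofList (clauses.flatMap (fun clause => clause.flatMap (fun x => [x, -x]))) := by
    rw [keys_fold, PySem.Dict.keys_empty, PySem.Set.update_nil_left]
  rw [PySem.Dict.items_eq_map_keys _ (by rw [hkeys]; exact PySem.Set.nodup_ofList _) [],
      hkeys, PySem.List.dedup_eq_ofList]
  refine List.map_congr_left ?_
  intro k _
  rw [getD_fold, PySem.Dict.getD_empty, PySem.List.dedup_eq_ofList]
  rfl
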